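-- pv_equiv track=rewrite | github.com/panzarkatten/STL-Z-height-Sorter | main.py | split_stl_list
-- ===== SOURCE A (Python) =====
-- def split_stl_list(stl_list):
--     main, accent, other = [], [], []
--     for stl in stl_list:
--         type = stl['type']
--         if type == 'main':
--             main.append(stl)
--         if type == 'accent':
--             accent.append(stl)
--         if type == 'other':
--             other.append(stl)
--
--     return [main, accent, other]
-- ===== SOURCE B (Python) =====
-- def split_stl_list(stl_list):
--     return [[s for s in stl_list if s['type'] == t] for t in ('main', 'accent', 'other')]
-- ===== Notes on version B (the rewrite author's own statement) =====
-- stated objective: simpler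
-- what changed: Replaces the single bucketing pass with three mutable accumulators by three independent filtering comprehensions (one scan per bucket) returned directly.
import Mathlib
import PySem

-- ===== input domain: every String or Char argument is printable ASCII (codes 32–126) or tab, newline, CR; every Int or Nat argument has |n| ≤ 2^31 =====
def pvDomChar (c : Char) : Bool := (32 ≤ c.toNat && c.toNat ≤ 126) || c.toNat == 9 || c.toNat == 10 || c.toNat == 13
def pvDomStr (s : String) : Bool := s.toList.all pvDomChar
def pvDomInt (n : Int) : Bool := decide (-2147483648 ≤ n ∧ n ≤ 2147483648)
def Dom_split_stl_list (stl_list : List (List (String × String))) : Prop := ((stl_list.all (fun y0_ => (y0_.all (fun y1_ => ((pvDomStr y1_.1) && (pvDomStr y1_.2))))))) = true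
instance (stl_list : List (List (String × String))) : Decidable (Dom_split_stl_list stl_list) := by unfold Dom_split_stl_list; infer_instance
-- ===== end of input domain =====

-- B replaces A's single pass with three mutating accumulators by three independent
-- filtering comprehensions (objective: simpler). Pre_ excludes inputs where some
-- item lacks a 'type' key, on which Python A raises KeyError.

-- first match in the association list = Python dict lookup stl['type']
def pyGetType? (stl : List (String × String)) : Option String :=
  (stl.find? (fun p => p.1 == "type")).map Prod.snd

-- ===== PORT A =====
-- single fold over the list, threading (main, accent, other); stl['type'] is a
-- dict lookup that raises on a missing key — total here via getD, excluded by Pre_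
def split_stl_list (stl_list : List (List (String × String))) : List (List (List (String × String))) :=
  let st := stl_list.foldl
    (fun (acc : List (List (String × String)) × List (List (String × String)) × List (List (String × String))) stl =>
      let t := (pyGetType? stl).getD ""
      let acc := if t == "main" then (acc.1 ++ [stl], acc.2.1, acc.2.2) else acc
      let acc := if t == "accent" then (acc.1, acc.2.1 ++ [stl], acc.2.2) else acc
      let acc := if t == "other" then (acc.1, acc.2.1, acc.2.2 ++ [stl]) else acc
      acc)
    ([], [], [])
  [st.1, st.2.1, st.2.2]

-- ===== PORT B =====
-- three independent filters, one per bucket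
def split_stl_list_alt (stl_list : List (List (String × String))) : List (List (List (String × String))) :=
  ["main", "accent", "other"].map
    (fun t => stl_list.filter (fun s => (pyGetType? s).getD "" == t))

-- ===== PRECONDITION & SPEC =====
-- Pre_ excludes inputs where some item has no 'type' key: Python A raises KeyError there (B too).
def Pre_split_stl_list (stl_list : List (List (String × String))) : Prop :=
  ∀ stl ∈ stl_list, (pyGetType? stl).isSome
instance (stl_list : List (List (String × String))) : Decidable (Pre_split_stl_list stl_list) := by unfold Pre_split_stl_list; infer_instance
def pvWitness_split_stl_list : (List (List (String × String))) :=
  [[("type", "main"), ("name", "a")], [("type", "other")], [("type", "accent")], [("type", "main")]]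

def Spec_split_stl_list (stl_list : List (List (String × String))) (out : List (List (List (String × String)))) : Prop := out = split_stl_list_alt stl_list
instance (stl_list : List (List (String × String))) (out : List (List (List (String × String)))) : Decidable (Spec_split_stl_list stl_list out) := by unfold Spec_split_stl_list; infer_instance

-- ===== CLAIM (what is proved, stated in full; the proofs are below) =====
def Claim_equal_split_stl_list : Prop := ∀ (stl_list : List (List (String × String))), Dom_split_stl_list stl_list → Pre_split_stl_list stl_list → Spec_split_stl_list stl_list (split_stl_list stl_list)

-- ===== LEMMAS AND PROOFS =====

-- the fold started from (m, a, o) appends each bucket's filter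
theorem split_fold_eq (l : List (List (String × String)))
    (m a o : List (List (String × String))) :
    l.foldl
      (fun (acc : List (List (String × String)) × List (List (String × String)) × List (List (String × String))) stl =>
        let t := (pyGetType? stl).getD ""
        let acc := if t == "main" then (acc.1 ++ [stl], acc.2.1, acc.2.2) else acc
        let acc := if t == "accent" then (acc.1, acc.2.1 ++ [stl], acc.2.2) else acc
        let acc := if t == "other" then (acc.1, acc.2.1, acc.2.2 ++ [stl]) else acc
        acc)
      (m, a, o)
    = (m ++ l.filter (fun s => (pyGetType? s).getD "" == "main"),
       a ++ l.filter (fun s => (pyGetType? s).getD "" == "accent"),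
       o ++ l.filter (fun s => (pyGetType? s).getD "" == "other")) := by
  induction l generalizing m a o with
  | nil => simp
  | cons hd tl ih =>
    simp only [List.foldl_cons, List.filter_cons]
    split_ifs with h1 h2 h3 <;> simp_all [ih]

theorem split_stl_list_spec' (stl_list : List (List (String × String))) :
    split_stl_list stl_list = split_stl_list_alt stl_list := by
  simp only [split_stl_list, split_stl_list_alt]
  rw [split_fold_eq]
  simp

-- ===== VERDICT (by name: the statement is the Claim_ definition above) =====
theorem split_stl_list_spec : Claim_equal_split_stl_list := by
  intro l _ _
  exact split_stl_list_spec' l
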